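-- pv_equiv track=rewrite | github.com/vercah/string-attractors | pseudostd_closure.py | get_dir_seq
-- ===== SOURCE A (Python) =====
-- from typing import Tuple
--
-- def get_dir_seq(user_arg: str) -> Tuple[list, int]:
--     period = 0
--     par = False
--     dir = []
--     for elem in user_arg:
--         try:
--             dir.append(int(elem))
--             if par:
--                 period += 1
--         except ValueError:
--             if elem == '(':
--                 par = True
--         # anything else will be ignored
--     return dir, period
-- ===== SOURCE B (Python) =====
-- def get_dir_seq(user_arg: str):
--     dir = [int(c) for c in user_arg if c.isdigit()]
--     idx = user_arg.find('(')
--     period = 0 if idx == -1 else sum(1 for c in user_arg[idx + 1:] if c.isdigit())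
--     return dir, period
-- ===== Notes on version B (the rewrite author's own statement) =====
-- stated objective: simpler
-- what changed: Replaces A's single flag-driven loop (a 'par' flag flipped at the first paren and carried through every iteration, with try/except around each character) by a locate-then-count decomposition: one comprehension collects the digits, one find locates the paren, and the period is a count over the suffix after it.
import Mathlib
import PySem

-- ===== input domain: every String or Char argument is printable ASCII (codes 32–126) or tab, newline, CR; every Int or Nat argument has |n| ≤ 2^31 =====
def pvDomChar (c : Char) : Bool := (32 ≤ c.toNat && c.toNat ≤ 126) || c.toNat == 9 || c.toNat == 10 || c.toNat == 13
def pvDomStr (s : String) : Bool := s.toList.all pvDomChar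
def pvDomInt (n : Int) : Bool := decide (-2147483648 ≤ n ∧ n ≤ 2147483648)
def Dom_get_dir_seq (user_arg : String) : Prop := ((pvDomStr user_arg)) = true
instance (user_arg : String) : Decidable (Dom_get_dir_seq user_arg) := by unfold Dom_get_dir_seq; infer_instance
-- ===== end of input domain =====

-- B replaces A's flag-driven accumulating loop by locate-the-'('-then-count; objective: simpler.

-- value of int(c) for a single ASCII digit character (exact on the ASCII domain)
def pvDigitVal (c : Char) : Int := (c.toNat : Int) - 48

-- ===== PORT A =====
-- A's single loop with state (period, par, dir); 'try: int(elem)' succeeds exactly on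
-- ASCII digits within the domain, ported as Char.isDigit.
def get_dir_seq (user_arg : String) : List Int × Int :=
  let st := user_arg.toList.foldl
    (fun (st : Int × Bool × List Int) elem =>
      if elem.isDigit then
        (if st.2.1 then st.1 + 1 else st.1, st.2.1, st.2.2 ++ [pvDigitVal elem])
      else if elem = '(' then (st.1, true, st.2.2)
      else st)
    (0, false, [])
  (st.2.2, st.1)

-- ===== PORT B =====
-- Source B: digit comprehension; user_arg.find('(') ported as List.findIdx? on the character
-- list (exact for a one-character pattern: first index of '(' or none for -1);
-- the sum over the suffix is a countP.
def get_dir_seq_alt (user_arg : String) : List Int × Int :=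
  let cs := user_arg.toList
  let dir := (cs.filter Char.isDigit).map pvDigitVal
  let period : Int :=
    match cs.findIdx? (· = '(') with
    | none => 0
    | some idx => ((cs.drop (idx + 1)).countP Char.isDigit : Int)
  (dir, period)

-- ===== PRECONDITION & SPEC =====
def Spec_get_dir_seq (user_arg : String) (out : List Int × Int) : Prop := out = get_dir_seq_alt user_arg
instance (user_arg : String) (out : List Int × Int) : Decidable (Spec_get_dir_seq user_arg out) := by unfold Spec_get_dir_seq; infer_instance

-- ===== CLAIM (what is proved, stated in full; the proofs are below) =====
def Claim_equal_get_dir_seq : Prop := ∀ (user_arg : String), Dom_get_dir_seq user_arg → Spec_get_dir_seq user_arg (get_dir_seq user_arg)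

-- ===== LEMMAS AND PROOFS =====

-- A's loop body, named for the lemmas
def pvStepA (st : Int × Bool × List Int) (elem : Char) : Int × Bool × List Int :=
  if elem.isDigit then
    (if st.2.1 then st.1 + 1 else st.1, st.2.1, st.2.2 ++ [pvDigitVal elem])
  else if elem = '(' then (st.1, true, st.2.2)
  else st

theorem get_dir_seq_eq_foldl (user_arg : String) :
    get_dir_seq user_arg =
      ((user_arg.toList.foldl pvStepA (0, false, [])).2.2,
       (user_arg.toList.foldl pvStepA (0, false, [])).1) := rfl

-- once par = true, the loop adds the digits and counts all of them
theorem loopA_true (l : List Char) (p : Int) (dir : List Int) :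
    l.foldl pvStepA (p, true, dir) =
      (p + (l.countP Char.isDigit : Int), true, dir ++ (l.filter Char.isDigit).map pvDigitVal) := by
  induction l generalizing p dir with
  | nil => simp
  | cons c l ih =>
    by_cases hd : c.isDigit
    · simp [pvStepA, hd, ih]
      ring
    · by_cases hp : c = '('
      · simp [pvStepA, hp, ih]
      · simp [pvStepA, hd, hp, ih]

-- with par = false, the loop collects digits and starts counting after the first '('
theorem loopA_false (l : List Char) (p : Int) (dir : List Int) :
    l.foldl pvStepA (p, false, dir) =
      match l.findIdx? (· = '(') with
      | none => (p, false, dir ++ (l.filter Char.isDigit).map pvDigitVal)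
      | some idx =>
          (p + ((l.drop (idx + 1)).countP Char.isDigit : Int), true,
           dir ++ (l.filter Char.isDigit).map pvDigitVal) := by
  induction l generalizing p dir with
  | nil => simp
  | cons c l ih =>
    by_cases hp : c = '('
    · subst hp
      simp [pvStepA, List.findIdx?_cons, loopA_true]
    · have hfi : (c :: l).findIdx? (· = '(') = (l.findIdx? (· = '(')).map (· + 1) := by
        simp [List.findIdx?_cons, hp]
      by_cases hd : c.isDigit
      · rw [List.foldl_cons]
        have hstep : pvStepA (p, false, dir) c = (p, false, dir ++ [pvDigitVal c]) := by
          simp [pvStepA, hd]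
        rw [hstep, ih, hfi]
        cases l.findIdx? (· = '(') with
        | none => simp [hd]
        | some idx => simp [hd]
      · rw [List.foldl_cons]
        have hstep : pvStepA (p, false, dir) c = (p, false, dir) := by
          simp [pvStepA, hd, hp]
        rw [hstep, ih, hfi]
        cases l.findIdx? (· = '(') with
        | none => simp [hd]
        | some idx => simp [hd]

-- ===== VERDICT (by name: the statement is the Claim_ definition above) =====
theorem get_dir_seq_spec : Claim_equal_get_dir_seq := by
  intro user_arg _
  unfold Spec_get_dir_seq
  rw [get_dir_seq_eq_foldl, loopA_false]
  unfold get_dir_seq_alt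
  cases h : user_arg.toList.findIdx? (· = '(') with
  | none => simp [h]
  | some idx => simp [h]
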